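-- pv_equiv track=rewrite | github.com/elinat17/cs279_final_project | cs279FinalProject/sort.py | newmaxdir
-- ===== SOURCE A (Python) =====
-- def newmaxdir(files):
-- 	namedict = {}
--
-- 	for file in files:
-- 		index = file.find('-')
-- 		start = file[:index]
-- 		if start not in namedict:
-- 			namedict[start] = file
-- 		else:
-- 			currfilename = namedict[start]
-- 			currNumIndex = currfilename.find('-')
-- 			currnum = currfilename[currNumIndex:-8]
-- 			newnum = file[index:-8]
-- 			if newnum > currnum:
-- 				namedict[start] = file
-- 	filelist = []
-- 	for names in namedict:
-- 		filelist.append(namedict[names])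
-- 	return filelist
-- ===== SOURCE B (Python) =====
-- def newmaxdir(files):
--     # group files by prefix (first-seen key order), then pick each group's max by the version slice
--     groups = {}
--     for file in files:
--         groups.setdefault(file[:file.find('-')], []).append(file)
--     return [max(g, key=lambda f: f[f.find('-'):-8]) for g in groups.values()]
-- ===== Notes on version B (the rewrite author's own statement) =====
-- stated objective: alternative
-- what changed: Replaces A's single-pass running-max dict update with a two-phase group-then-reduce: first collect every file per prefix into a dict of lists (first-seen key order), then select each group's representative with max over the same version-slice key.
import Mathlib
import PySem

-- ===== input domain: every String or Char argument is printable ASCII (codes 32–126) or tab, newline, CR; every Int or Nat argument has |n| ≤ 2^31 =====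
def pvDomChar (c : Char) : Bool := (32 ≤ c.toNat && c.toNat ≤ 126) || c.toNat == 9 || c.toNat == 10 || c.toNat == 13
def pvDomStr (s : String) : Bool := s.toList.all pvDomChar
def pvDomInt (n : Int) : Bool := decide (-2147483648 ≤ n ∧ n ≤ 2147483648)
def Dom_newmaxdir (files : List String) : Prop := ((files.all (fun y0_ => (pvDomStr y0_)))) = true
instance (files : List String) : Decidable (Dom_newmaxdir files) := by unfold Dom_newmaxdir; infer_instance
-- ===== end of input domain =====

-- B re-implements A's running-max dict loop as group-by-prefix then max-per-group (same values, same order).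


-- ===== PORT A =====
-- Python's string comparison 'newnum > currnum' is code-point lexicographic order; it is
-- compared here on .toList (List Char '<' is exactly that order, and kernel-reducible).
def newmaxdir (files : List String) : List String :=
  let namedict :=
    files.foldl (fun namedict file =>
      let index := PySem.Str.find file "-"
      let start := PySem.Str.slice file none (some index)
      if namedict.contains start = false then
        namedict.insert start file
      else
        match namedict.get? start with
        | none => namedict   -- unreachable: 'start' is a key of namedict in this branch
        | some currfilename =>
          let currNumIndex := PySem.Str.find currfilename "-"
          let currnum := PySem.Str.slice currfilename (some currNumIndex) (some (-8))
          let newnum := PySem.Str.slice file (some index) (some (-8))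
          if currnum.toList < newnum.toList then namedict.insert start file
          else namedict)
      (PySem.Dict.empty : PySem.Dict String String)
  -- 'for names in namedict: filelist.append(namedict[names])': looking up each key in order yields the values in order
  namedict.values

-- ===== PORT B =====
-- f[f.find('-'):-8], the version key of Source B's lambda; as List Char so '<' is Python's code-point order
def pvKey (f : String) : List Char :=
  (PySem.Str.slice f (some (PySem.Str.find f "-")) (some (-8))).toList

def newmaxdir_alt (files : List String) : List String :=
  let groups :=
    files.foldl (fun groups file =>
      let k := PySem.Str.slice file none (some (PySem.Str.find file "-"))
      match groups.get? k with
      | none => groups.insert k [file]          -- setdefault creates the group …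
      | some g => groups.insert k (g ++ [file]) -- … and append extends it in place
      )
      (PySem.Dict.empty : PySem.Dict String (List String))
  -- every group is nonempty, so Python's max always returns: filterMap keeps exactly those values
  groups.values.filterMap (fun g => PySem.List.max? g pvKey)

-- ===== PRECONDITION & SPEC =====
def Spec_newmaxdir (files : List String) (out : List String) : Prop := out = newmaxdir_alt files
instance (files : List String) (out : List String) : Decidable (Spec_newmaxdir files out) := by unfold Spec_newmaxdir; infer_instance

-- ===== CLAIM (what is proved, stated in full; the proofs are below) =====
def Claim_equal_newmaxdir : Prop := ∀ (files : List String), Dom_newmaxdir files → Spec_newmaxdir files (newmaxdir files)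

-- ===== LEMMAS AND PROOFS =====

-- A's running maximum, recovered from a B-group: fold of the strict-'>'-update step
def pvBStep (m x : String) : String := if pvKey m < pvKey x then x else m

def pvBest : List String → String
  | [] => ""
  | f :: r => r.foldl pvBStep f

def pvF (p : String × List String) : String × String := (p.1, pvBest p.2)

-- the two loop bodies, named so the invariant can speak about them
def pvAStep (namedict : PySem.Dict String String) (file : String) : PySem.Dict String String :=
  let index := PySem.Str.find file "-"
  let start := PySem.Str.slice file none (some index)
  if namedict.contains start = false then
    namedict.insert start file
  else
    match namedict.get? start with
    | none => namedict
    | some currfilename =>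
      let currNumIndex := PySem.Str.find currfilename "-"
      let currnum := PySem.Str.slice currfilename (some currNumIndex) (some (-8))
      let newnum := PySem.Str.slice file (some index) (some (-8))
      if currnum.toList < newnum.toList then namedict.insert start file
      else namedict

def pvGStep (groups : PySem.Dict String (List String)) (file : String) : PySem.Dict String (List String) :=
  let k := PySem.Str.slice file none (some (PySem.Str.find file "-"))
  match groups.get? k with
  | none => groups.insert k [file]
  | some g => groups.insert k (g ++ [file])

-- the loop invariant
def pvRel (dA : PySem.Dict String String) (dG : PySem.Dict String (List String)) : Prop :=
  dA.items = dG.items.map pvF ∧ (∀ p ∈ dG.items, p.2 ≠ []) ∧ (dG.items.map Prod.fst).Nodup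

def pvOStep (acc : Option String) (x : String) : Option String :=
  match acc with
  | none => some x
  | some m => if pvKey m < pvKey x then some x else some m

lemma pv_max?_aux (r : List String) (f : String) :
    List.foldl pvOStep (some f) r = some (r.foldl pvBStep f) := by
  induction r generalizing f with
  | nil => rfl
  | cons x t ih =>
    simp only [List.foldl_cons]
    rw [show pvOStep (some f) x = some (pvBStep f x) by
      by_cases h : pvKey f < pvKey x <;> simp [pvOStep, pvBStep, h]]
    exact ih _

lemma pv_max?_cons (f : String) (r : List String) :
    PySem.List.max? (f :: r) pvKey = some (r.foldl pvBStep f) := by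
  simp only [PySem.List.max?, List.foldl_cons]
  exact (List.foldl_ext _ pvOStep (some f)
    (fun acc x _ => by cases acc <;> rfl)).trans (pv_max?_aux r f)

lemma pv_find?_map (L : List (String × List String)) (k : String) :
    List.find? (fun p => p.1 == k) (L.map pvF) = (List.find? (fun p => p.1 == k) L).map pvF := by
  induction L with
  | nil => rfl
  | cons p t ih =>
    by_cases h : p.1 = k
    · simp [pvF, h]
    · simp [pvF, h, ih]

lemma pv_any_map (L : List (String × List String)) (k : String) :
    (L.map pvF).any (fun p => p.1 == k) = L.any (fun p => p.1 == k) := by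
  induction L with
  | nil => rfl
  | cons p t ih => simp [pvF, ih]

lemma pv_unique_entry (L : List (String × List String)) (k : String) (g : List String)
    (hnd : (L.map Prod.fst).Nodup)
    (hf : List.find? (fun p => p.1 == k) L = some (k, g)) :
    ∀ p ∈ L, p.1 = k → p = (k, g) := by
  induction L with
  | nil => simp at hf
  | cons a t ih =>
    simp only [List.map_cons, List.nodup_cons] at hnd
    intro p hp hpk
    rcases List.mem_cons.mp hp with h1 | hpt
    · rw [List.find?_cons_of_pos (by simp [← h1, hpk])] at hf
      exact h1.trans (Option.some_inj.mp hf)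
    · by_cases ha : a.1 = k
      · -- a has key k but p ∈ t also has key k: contradicts nodup
        exfalso
        exact hnd.1 (by rw [ha, ← hpk]; exact List.mem_map_of_mem hpt)
      · rw [List.find?_cons_of_neg (by simpa using ha)] at hf
        exact ih hnd.2 hf p hpt hpk

lemma pv_step (dA : PySem.Dict String String) (dG : PySem.Dict String (List String))
    (file : String) (h : pvRel dA dG) : pvRel (pvAStep dA file) (pvGStep dG file) := by
  obtain ⟨hitems, hne, hnd⟩ := h
  set k := PySem.Str.slice file none (some (PySem.Str.find file "-")) with hk
  rcases hget : dG.get? k with _ | g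
  · -- new key: A inserts file, B inserts [file]
    have hfind : List.find? (fun p => p.1 == k) dG.items = none := by
      simp only [PySem.Dict.get?, Option.map_eq_none_iff] at hget
      exact hget
    have hcG : dG.contains k = false := by
      simp only [PySem.Dict.contains]
      rw [List.any_eq_false]
      intro p hp
      have := List.find?_eq_none.mp hfind p hp
      simpa using this
    have hcA : dA.contains k = false := by
      simp only [PySem.Dict.contains, hitems]
      rw [pv_any_map]
      simpa [PySem.Dict.contains] using hcG
    have hknot : k ∉ dG.items.map Prod.fst := by
      intro hmem
      rcases List.mem_map.mp hmem with ⟨p, hp, hpk⟩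
      have := List.find?_eq_none.mp hfind p hp
      simp [hpk] at this
    simp only [pvAStep, pvGStep, hget, ← hk, hcA]
    refine ⟨?_, ?_, ?_⟩
    · simp [PySem.Dict.insert, hcA, hcG, hitems, pvF, pvBest]
    · simp only [PySem.Dict.insert, hcG, Bool.false_eq_true, if_false]
      intro p hp
      rcases List.mem_append.mp hp with hp | hp
      · exact hne p hp
      · simp at hp; subst hp; simp
    · simp only [PySem.Dict.insert, hcG, Bool.false_eq_true, if_false]
      rw [List.map_append]
      refine List.Nodup.append hnd (by simp) ?_
      intro a ha hb
      simp only [List.map_cons, List.map_nil, List.mem_singleton] at hb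
      subst hb
      exact hknot ha
  · -- existing key
    have hfind : ∃ p0, List.find? (fun p => p.1 == k) dG.items = some p0 ∧ p0.2 = g := by
      simp only [PySem.Dict.get?] at hget
      rcases hf : List.find? (fun p => p.1 == k) dG.items with _ | p0
      · simp [hf] at hget
      · simp only [hf, Option.map_some, Option.some_inj] at hget
        exact ⟨p0, hf, hget⟩
    obtain ⟨p0, hf0, hp02⟩ := hfind
    have hp01 : p0.1 = k := by
      have := List.find?_some hf0
      simpa using this
    have hfkg : List.find? (fun p => p.1 == k) dG.items = some (k, g) := by
      rw [hf0]; congr 1; exact Prod.ext hp01 hp02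
    have hgmem : (k, g) ∈ dG.items := List.mem_of_find?_eq_some hfkg
    have hgne : g ≠ [] := hne _ hgmem
    have hcG : dG.contains k = true := by
      simp only [PySem.Dict.contains]
      rw [List.any_eq_true]
      exact ⟨(k, g), hgmem, by simp⟩
    have hcA : dA.contains k = true := by
      simp only [PySem.Dict.contains, hitems]
      rw [pv_any_map]
      simpa [PySem.Dict.contains] using hcG
    have hgetA : dA.get? k = some (pvBest g) := by
      simp only [PySem.Dict.get?, hitems, pv_find?_map, hfkg]
      rfl
    obtain ⟨f0, r0, rfl⟩ := List.exists_cons_of_ne_nil hgne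
    have hbestapp : pvBest (f0 :: (r0 ++ [file])) = pvBStep (pvBest (f0 :: r0)) file := by
      simp [pvBest, List.foldl_append]
    -- B's items after the step
    have hGitems : (pvGStep dG file).items
        = dG.items.map (fun p => if p.1 == k then (k, (f0 :: r0) ++ [file]) else p) := by
      simp only [pvGStep]
      rw [← hk, hget]
      simp only [PySem.Dict.insert, hcG, if_true]
    simp only [pvAStep, ← hk, hcA, hgetA, Bool.true_eq_false, if_false]
    have hkeysG : ((pvGStep dG file).items.map Prod.fst) = dG.items.map Prod.fst := by
      rw [hGitems, List.map_map]
      apply List.map_congr_left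
      intro p _
      by_cases hp : p.1 = k <;> simp [hp]
    have hneG : ∀ p ∈ (pvGStep dG file).items, p.2 ≠ [] := by
      rw [hGitems]
      intro p hp
      rcases List.mem_map.mp hp with ⟨q, hq, hqe⟩
      by_cases hqk : q.1 = k
      · simp [hqk] at hqe; subst hqe; simp
      · simp [hqk] at hqe; subst hqe; exact hne q hq
    by_cases hcmp : pvKey (pvBest (f0 :: r0)) < pvKey file
    · -- A updates: both entries become 'file'
      have : (PySem.Str.slice (pvBest (f0 :: r0)) (some (PySem.Str.find (pvBest (f0 :: r0)) "-")) (some (-8))).toList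
          < (PySem.Str.slice file (some (PySem.Str.find file "-")) (some (-8))).toList := hcmp
      rw [if_pos this]
      refine ⟨?_, hneG, by rw [hkeysG]; exact hnd⟩
      rw [hGitems, List.map_map]
      simp only [PySem.Dict.insert, hcA, if_true, hitems, List.map_map]
      apply List.map_congr_left
      intro p _
      have hbfile : pvBest (f0 :: (r0 ++ [file])) = file := by
        rw [hbestapp]; unfold pvBStep; rw [if_pos hcmp]
      by_cases hp : p.1 = k <;> simp [pvF, hp, hbfile]
    · -- A keeps: the replaced value equals the old one
      have : ¬ (PySem.Str.slice (pvBest (f0 :: r0)) (some (PySem.Str.find (pvBest (f0 :: r0)) "-")) (some (-8))).toList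
          < (PySem.Str.slice file (some (PySem.Str.find file "-")) (some (-8))).toList := hcmp
      rw [if_neg this]
      refine ⟨?_, hneG, by rw [hkeysG]; exact hnd⟩
      rw [hGitems, List.map_map, hitems]
      apply List.map_congr_left
      intro p hp
      by_cases hpk : p.1 = k
      · have hpe : p = (k, f0 :: r0) := pv_unique_entry dG.items k (f0 :: r0) hnd hfkg p hp hpk
        have hbkeep : pvBest (f0 :: (r0 ++ [file])) = pvBest (f0 :: r0) := by
          rw [hbestapp]; unfold pvBStep; rw [if_neg hcmp]
        subst hpe
        simp [pvF, hbkeep]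
      · simp [pvF, hpk]

lemma pv_loop (files : List String) :
    ∀ (dA : PySem.Dict String String) (dG : PySem.Dict String (List String)),
      pvRel dA dG → pvRel (files.foldl pvAStep dA) (files.foldl pvGStep dG) := by
  induction files with
  | nil => intro dA dG h; exact h
  | cons f t ih =>
    intro dA dG h
    exact ih _ _ (pv_step dA dG f h)

lemma pv_values_aux (L : List (String × List String)) (hne : ∀ p ∈ L, p.2 ≠ []) :
    (L.map pvF).map Prod.snd = (L.map Prod.snd).filterMap (fun g => PySem.List.max? g pvKey) := by
  induction L with
  | nil => rfl
  | cons p t ih =>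
    obtain ⟨f0, r0, hp2⟩ := List.exists_cons_of_ne_nil (hne p List.mem_cons_self)
    simp only [List.map_cons, List.filterMap_cons]
    rw [show PySem.List.max? p.2 pvKey = some (pvBest p.2) by
      rw [hp2, pv_max?_cons]; rfl]
    rw [ih (fun q hq => hne q (List.mem_cons_of_mem p hq))]
    rfl

lemma pv_values (dA : PySem.Dict String String) (dG : PySem.Dict String (List String))
    (h : pvRel dA dG) :
    dA.values = dG.values.filterMap (fun g => PySem.List.max? g pvKey) := by
  obtain ⟨hitems, hne, _⟩ := h
  simp only [PySem.Dict.values, hitems]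
  exact pv_values_aux dG.items hne

-- ===== VERDICT (by name: the statement is the Claim_ definition above) =====
theorem newmaxdir_spec : Claim_equal_newmaxdir := by
  intro files _
  show newmaxdir files = newmaxdir_alt files
  have hA : newmaxdir files = (files.foldl pvAStep PySem.Dict.empty).values := rfl
  have hB : newmaxdir_alt files
      = (files.foldl pvGStep PySem.Dict.empty).values.filterMap (fun g => PySem.List.max? g pvKey) := rfl
  rw [hA, hB]
  exact pv_values _ _ (pv_loop files _ _ ⟨rfl, by simp [PySem.Dict.empty], by simp [PySem.Dict.empty]⟩)
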